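-- pv_equiv track=rewrite | github.com/pill/recipes-etl | src/recipes/utils/local_parser.py | _extract_meal_type
-- ===== SOURCE A (Python) =====
-- from typing import List, Dict, Any, Optional
--
-- def _extract_meal_type(text: str, title: str, ingredients: List) -> Optional[str]:
--     """Extract meal type from text, title, and ingredients."""
--     text_lower = text.lower()
--     title_lower = title.lower()
--     combined = f"{title_lower} {text_lower}"
--
--     # Meal type keywords
--     meal_keywords = {
--         'breakfast': ['breakfast', 'pancake', 'waffle', 'omelette', 'omelet', 'french toast',
--                      'cereal', 'granola', 'muffin', 'bagel', 'croissant', 'eggs benedict',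
--                      'breakfast burrito', 'brunch', 'morning'],
--         'lunch': ['lunch', 'sandwich', 'wrap', 'salad', 'soup and salad', 'midday'],
--         'dinner': ['dinner', 'supper', 'main course', 'entrée', 'entree', 'evening meal',
--                   'brat', 'bratwurst', 'sausage', 'steak', 'chops', 'roast', 'burger',
--                   'gravy', 'pasta', 'chicken', 'beef', 'pork', 'fish'],
--         'dessert': ['dessert', 'cake', 'cookie', 'brownie', 'pie', 'tart', 'pudding',
--                    'ice cream', 'sorbet', 'mousse', 'truffle', 'candy', 'sweet', 'frosting',
--                    'cheesecake', 'cupcake', 'macaron', 'tiramisu', 'parfait', 'fudge'],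
--         'snack': ['snack', 'appetizer', 'finger food', 'dip', 'chips', 'popcorn',
--                  'energy ball', 'trail mix', 'tapas', 'mezze'],
--     }
--
--     # Check for explicit meal type mentions
--     # Prioritize dinner over dessert if there are main course indicators
--     dinner_score = sum(1 for keyword in meal_keywords['dinner'] if keyword in combined)
--     dessert_score = sum(1 for keyword in meal_keywords['dessert'] if keyword in combined)
--
--     # If both dinner and dessert keywords found, prefer dinner
--     if dinner_score > 0 and dessert_score > 0:
--         # Check which is more prominent in the title
--         dinner_in_title = any(keyword in title_lower for keyword in meal_keywords['dinner'])
--         dessert_in_title = any(keyword in title_lower for keyword in meal_keywords['dessert'])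
--
--         if dinner_in_title and not dessert_in_title:
--             return 'dinner'
--         elif dessert_in_title and not dinner_in_title:
--             return 'dessert'
--         # If both or neither in title, prefer dinner if it has more matches
--         elif dinner_score >= dessert_score:
--             return 'dinner'
--
--     # Otherwise check all meal types
--     for meal_type, keywords in meal_keywords.items():
--         matches = sum(1 for keyword in keywords if keyword in combined)
--         if matches >= 1:
--             # Prioritize title matches
--             if any(keyword in title_lower for keyword in keywords):
--                 return meal_type
--             # Otherwise use first match
--             return meal_type
--
--     # Heuristic: desserts usually have sugar/chocolate
--     dessert_ingredients = ['sugar', 'chocolate', 'cocoa', 'honey', 'maple syrup', 'vanilla extract']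
--     if any(ing in text_lower for ing in dessert_ingredients):
--         # Check if it's likely a dessert (not just a sweet sauce for dinner)
--         if not any(savory in combined for savory in ['chicken', 'beef', 'pork', 'fish', 'meat', 'pasta']):
--             return 'dessert'
--
--     return None
-- ===== SOURCE B (Python) =====
-- MEAL_KEYWORDS = [
--     ('breakfast', ['breakfast', 'pancake', 'waffle', 'omelette', 'omelet', 'french toast',
--                    'cereal', 'granola', 'muffin', 'bagel', 'croissant', 'eggs benedict',
--                    'breakfast burrito', 'brunch', 'morning']),
--     ('lunch', ['lunch', 'sandwich', 'wrap', 'salad', 'soup and salad', 'midday']),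
--     ('dinner', ['dinner', 'supper', 'main course', 'entrée', 'entree', 'evening meal',
--                 'brat', 'bratwurst', 'sausage', 'steak', 'chops', 'roast', 'burger',
--                 'gravy', 'pasta', 'chicken', 'beef', 'pork', 'fish']),
--     ('dessert', ['dessert', 'cake', 'cookie', 'brownie', 'pie', 'tart', 'pudding',
--                  'ice cream', 'sorbet', 'mousse', 'truffle', 'candy', 'sweet', 'frosting',
--                  'cheesecake', 'cupcake', 'macaron', 'tiramisu', 'parfait', 'fudge']),
--     ('snack', ['snack', 'appetizer', 'finger food', 'dip', 'chips', 'popcorn',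
--                'energy ball', 'trail mix', 'tapas', 'mezze']),
-- ]
-- # one flat keyword->category table, scanned once
-- FLAT = [(kw, cat) for cat, kws in MEAL_KEYWORDS for kw in kws]
-- DESSERT_INGREDIENTS = ['sugar', 'chocolate', 'cocoa', 'honey', 'maple syrup', 'vanilla extract']
-- SAVORY = ['chicken', 'beef', 'pork', 'fish', 'meat', 'pasta']
--
--
-- def _extract_meal_type(text, title, ingredients):
--     """Single pass over a flat tagged keyword table accumulating hit flags,
--     dinner/dessert counts and title flags; all decisions are then a plain
--     branch chain over the accumulators (no per-category rescans, no loop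
--     over categories)."""
--     text_lower = text.lower()
--     title_lower = title.lower()
--     combined = title_lower + " " + text_lower
--     hb = hl = hs = False
--     din_c = des_c = 0
--     din_t = des_t = False
--     for kw, cat in FLAT:
--         c = kw in combined
--         if cat == 'dinner':
--             if c:
--                 din_c += 1
--             if kw in title_lower:
--                 din_t = True
--         elif cat == 'dessert':
--             if c:
--                 des_c += 1
--             if kw in title_lower:
--                 des_t = True
--         elif c:
--             if cat == 'breakfast':
--                 hb = True
--             elif cat == 'lunch':
--                 hl = True
--             else:
--                 hs = True
--     if din_c > 0 and des_c > 0: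
--         if din_t != des_t:
--             return 'dinner' if din_t else 'dessert'
--         if din_c >= des_c:
--             return 'dinner'
--     if hb:
--         return 'breakfast'
--     if hl:
--         return 'lunch'
--     if din_c > 0:
--         return 'dinner'
--     if des_c > 0:
--         return 'dessert'
--     if hs:
--         return 'snack'
--     if any(i in text_lower for i in DESSERT_INGREDIENTS) and \
--        not any(s in combined for s in SAVORY):
--         return 'dessert'
--     return None
-- ===== Notes on version B (the rewrite author's own statement) =====
-- stated objective: alternative
-- what changed: B flattens the keyword dict into one tagged (keyword, category) list scanned in a single accumulator pass (hit flags, dinner/dessert counts and title flags), then decides everything with a plain branch chain, replacing A's per-category rescans and its loop over categories with returns inside.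
import Mathlib
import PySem

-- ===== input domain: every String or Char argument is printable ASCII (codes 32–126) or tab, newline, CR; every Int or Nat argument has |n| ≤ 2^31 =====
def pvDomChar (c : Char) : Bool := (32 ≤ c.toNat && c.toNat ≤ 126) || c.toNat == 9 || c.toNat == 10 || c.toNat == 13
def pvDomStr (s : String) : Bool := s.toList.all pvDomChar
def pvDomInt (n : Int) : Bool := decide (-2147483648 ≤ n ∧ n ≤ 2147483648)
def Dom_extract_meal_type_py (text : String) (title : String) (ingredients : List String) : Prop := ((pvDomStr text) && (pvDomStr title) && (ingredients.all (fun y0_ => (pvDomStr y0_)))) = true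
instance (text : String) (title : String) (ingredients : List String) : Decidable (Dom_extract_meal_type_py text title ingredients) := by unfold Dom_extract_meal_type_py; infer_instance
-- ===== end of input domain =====

-- B replaces A's per-category rescans and category loop by one pass over a flat tagged
-- keyword table with an accumulator, then a plain branch chain ("alternative"; return value only).

-- ===== PORT A =====

def mealKeywordsA : List (String × List String) :=
  [("breakfast", ["breakfast", "pancake", "waffle", "omelette", "omelet", "french toast",
      "cereal", "granola", "muffin", "bagel", "croissant", "eggs benedict",
      "breakfast burrito", "brunch", "morning"]),
   ("lunch", ["lunch", "sandwich", "wrap", "salad", "soup and salad", "midday"]),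
   ("dinner", ["dinner", "supper", "main course", "entrée", "entree", "evening meal",
      "brat", "bratwurst", "sausage", "steak", "chops", "roast", "burger",
      "gravy", "pasta", "chicken", "beef", "pork", "fish"]),
   ("dessert", ["dessert", "cake", "cookie", "brownie", "pie", "tart", "pudding",
      "ice cream", "sorbet", "mousse", "truffle", "candy", "sweet", "frosting",
      "cheesecake", "cupcake", "macaron", "tiramisu", "parfait", "fudge"]),
   ("snack", ["snack", "appetizer", "finger food", "dip", "chips", "popcorn",
      "energy ball", "trail mix", "tapas", "mezze"])]

-- the 'for meal_type, keywords in meal_keywords.items():' loop (A returns from inside it)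
def mealLoopA (combined : String) (title_lower : String) : List (String × List String) → Option String
  | [] => none
  | (meal_type, keywords) :: rest =>
    let matches_ : Int := keywords.foldl (fun acc kw => if PySem.Str.isIn kw combined then acc + 1 else acc) 0
    if matches_ ≥ 1 then
      if keywords.any (fun kw => PySem.Str.isIn kw title_lower) then some meal_type
      else some meal_type
    else mealLoopA combined title_lower rest

-- the final 'dessert ingredients' heuristic of A
def fallbackA (text_lower : String) (combined : String) : Option String :=
  let dessert_ingredients := ["sugar", "chocolate", "cocoa", "honey", "maple syrup", "vanilla extract"]
  if dessert_ingredients.any (fun ing => PySem.Str.isIn ing text_lower) then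
    if !(["chicken", "beef", "pork", "fish", "meat", "pasta"].any
          (fun savory => PySem.Str.isIn savory combined)) then some "dessert"
    else none
  else none

-- everything A runs after the dinner/dessert tie-break block falls through
def afterTieA (combined title_lower text_lower : String) (meal_keywords : PySem.Dict String (List String)) : Option String :=
  match mealLoopA combined title_lower (PySem.Dict.items meal_keywords) with
  | some r => some r
  | none => fallbackA text_lower combined

def extract_meal_type_py (text : String) (title : String) (ingredients : List String) : Option String :=
  let text_lower := PySem.Str.lower text
  let title_lower := PySem.Str.lower title
  let combined := title_lower ++ " " ++ text_lower
  let meal_keywords : PySem.Dict String (List String) := PySem.Dict.mk mealKeywordsA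
  let dinner_score : Int := (PySem.Dict.getD meal_keywords "dinner" []).foldl
      (fun acc kw => if PySem.Str.isIn kw combined then acc + 1 else acc) 0
  let dessert_score : Int := (PySem.Dict.getD meal_keywords "dessert" []).foldl
      (fun acc kw => if PySem.Str.isIn kw combined then acc + 1 else acc) 0
  if dinner_score > 0 ∧ dessert_score > 0 then
    let dinner_in_title := (PySem.Dict.getD meal_keywords "dinner" []).any (fun kw => PySem.Str.isIn kw title_lower)
    let dessert_in_title := (PySem.Dict.getD meal_keywords "dessert" []).any (fun kw => PySem.Str.isIn kw title_lower)
    if dinner_in_title ∧ ¬ dessert_in_title then some "dinner"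
    else if dessert_in_title ∧ ¬ dinner_in_title then some "dessert"
    else if dinner_score ≥ dessert_score then some "dinner"
    else afterTieA combined title_lower text_lower meal_keywords
  else afterTieA combined title_lower text_lower meal_keywords

-- ===== PORT B =====

def mealKeywordsB : List (String × List String) := mealKeywordsA

-- FLAT = [(kw, cat) for cat, kws in MEAL_KEYWORDS for kw in kws]
def flatB : List (String × String) :=
  mealKeywordsB.flatMap (fun p => p.2.map (fun kw => (kw, p.1)))

def dessertIngredientsB : List String := ["sugar", "chocolate", "cocoa", "honey", "maple syrup", "vanilla extract"]
def savoryB : List String := ["chicken", "beef", "pork", "fish", "meat", "pasta"]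

-- accumulator: (hb, hl, hs, din_c, din_t, des_c, des_t)
structure AccB where
  hb : Bool
  hl : Bool
  hs : Bool
  din_c : Int
  din_t : Bool
  des_c : Int
  des_t : Bool
deriving Repr, DecidableEq

-- loop body of B's single pass over FLAT
def stepB (combined title_lower : String) (acc : AccB) (p : String × String) : AccB :=
  let c := PySem.Str.isIn p.1 combined
  if p.2 == "dinner" then
    { acc with din_c := if c then acc.din_c + 1 else acc.din_c,
               din_t := if PySem.Str.isIn p.1 title_lower then true else acc.din_t }
  else if p.2 == "dessert" then
    { acc with des_c := if c then acc.des_c + 1 else acc.des_c,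
               des_t := if PySem.Str.isIn p.1 title_lower then true else acc.des_t }
  else if c then
    if p.2 == "breakfast" then { acc with hb := true }
    else if p.2 == "lunch" then { acc with hl := true }
    else { acc with hs := true }
  else acc

-- B's branch chain after the dinner/dessert precedence block
def restB (a : AccB) (text_lower combined : String) : Option String :=
  if a.hb then some "breakfast"
  else if a.hl then some "lunch"
  else if a.din_c > 0 then some "dinner"
  else if a.des_c > 0 then some "dessert"
  else if a.hs then some "snack"
  else if dessertIngredientsB.any (fun ing => PySem.Str.isIn ing text_lower) ∧
          ¬ (savoryB.any (fun sv => PySem.Str.isIn sv combined)) then some "dessert"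
  else none

def extract_meal_type_py_alt (text : String) (title : String) (ingredients : List String) : Option String :=
  let text_lower := PySem.Str.lower text
  let title_lower := PySem.Str.lower title
  let combined := title_lower ++ " " ++ text_lower
  let a := flatB.foldl (stepB combined title_lower) ⟨false, false, false, 0, false, 0, false⟩
  if a.din_c > 0 ∧ a.des_c > 0 then
    if a.din_t ≠ a.des_t then (if a.din_t then some "dinner" else some "dessert")
    else if a.din_c ≥ a.des_c then some "dinner"
    else restB a text_lower combined
  else restB a text_lower combined

-- ===== PRECONDITION & SPEC =====
def Spec_extract_meal_type_py (text : String) (title : String) (ingredients : List String) (out : Option String) : Prop := out = extract_meal_type_py_alt text title ingredients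
instance (text : String) (title : String) (ingredients : List String) (out : Option String) : Decidable (Spec_extract_meal_type_py text title ingredients out) := by unfold Spec_extract_meal_type_py; infer_instance

-- ===== CLAIM (what is proved, stated in full; the proofs are below) =====
def Claim_equal_extract_meal_type_py : Prop := ∀ (text : String) (title : String) (ingredients : List String), Dom_extract_meal_type_py text title ingredients → Spec_extract_meal_type_py text title ingredients (extract_meal_type_py text title ingredients)

-- ===== LEMMAS AND PROOFS =====

-- names for the five keyword lists (proof-side abbreviations; definitionally the lists in mealKeywordsA)
def kwBreak : List String := ["breakfast", "pancake", "waffle", "omelette", "omelet", "french toast",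
  "cereal", "granola", "muffin", "bagel", "croissant", "eggs benedict",
  "breakfast burrito", "brunch", "morning"]
def kwLunch : List String := ["lunch", "sandwich", "wrap", "salad", "soup and salad", "midday"]
def kwDin : List String := ["dinner", "supper", "main course", "entrée", "entree", "evening meal",
  "brat", "bratwurst", "sausage", "steak", "chops", "roast", "burger",
  "gravy", "pasta", "chicken", "beef", "pork", "fish"]
def kwDes : List String := ["dessert", "cake", "cookie", "brownie", "pie", "tart", "pudding",
  "ice cream", "sorbet", "mousse", "truffle", "candy", "sweet", "frosting",
  "cheesecake", "cupcake", "macaron", "tiramisu", "parfait", "fudge"]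
def kwSnack : List String := ["snack", "appetizer", "finger food", "dip", "chips", "popcorn",
  "energy ball", "trail mix", "tapas", "mezze"]

-- folding B's step over a block of keywords all tagged "dinner" only updates the dinner fields
theorem fold_dinner (c t : String) (l : List String) (acc : AccB) :
    (l.map (fun kw => (kw, "dinner"))).foldl (stepB c t) acc =
      { acc with din_c := acc.din_c + (l.countP (fun kw => PySem.Str.isIn kw c) : Int),
                 din_t := acc.din_t || l.any (fun kw => PySem.Str.isIn kw t) } := by
  induction l generalizing acc with
  | nil => simp
  | cons hd tl ih =>
    simp only [List.map, List.foldl_cons, List.any_cons, List.countP_cons, stepB]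
    rw [ih]
    cases h1 : PySem.Str.isIn hd c <;> cases h2 : PySem.Str.isIn hd t <;>
      simp_all [AccB.mk.injEq] <;> push_cast <;> omega

theorem fold_dessert (c t : String) (l : List String) (acc : AccB) :
    (l.map (fun kw => (kw, "dessert"))).foldl (stepB c t) acc =
      { acc with des_c := acc.des_c + (l.countP (fun kw => PySem.Str.isIn kw c) : Int),
                 des_t := acc.des_t || l.any (fun kw => PySem.Str.isIn kw t) } := by
  induction l generalizing acc with
  | nil => simp
  | cons hd tl ih =>
    simp only [List.map, List.foldl_cons, List.any_cons, List.countP_cons, stepB]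
    rw [ih]
    cases h1 : PySem.Str.isIn hd c <;> cases h2 : PySem.Str.isIn hd t <;>
      simp_all [AccB.mk.injEq] <;> push_cast <;> omega

theorem fold_breakfast (c t : String) (l : List String) (acc : AccB) :
    (l.map (fun kw => (kw, "breakfast"))).foldl (stepB c t) acc =
      { acc with hb := acc.hb || l.any (fun kw => PySem.Str.isIn kw c) } := by
  induction l generalizing acc with
  | nil => simp
  | cons hd tl ih =>
    simp only [List.map, List.foldl_cons, List.any_cons, stepB]
    rw [ih]
    cases h1 : PySem.Str.isIn hd c <;> simp [h1]

theorem fold_lunch (c t : String) (l : List String) (acc : AccB) :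
    (l.map (fun kw => (kw, "lunch"))).foldl (stepB c t) acc =
      { acc with hl := acc.hl || l.any (fun kw => PySem.Str.isIn kw c) } := by
  induction l generalizing acc with
  | nil => simp
  | cons hd tl ih =>
    simp only [List.map, List.foldl_cons, List.any_cons, stepB]
    rw [ih]
    cases h1 : PySem.Str.isIn hd c <;> simp [h1]

theorem fold_snack (c t : String) (l : List String) (acc : AccB) :
    (l.map (fun kw => (kw, "snack"))).foldl (stepB c t) acc =
      { acc with hs := acc.hs || l.any (fun kw => PySem.Str.isIn kw c) } := by
  induction l generalizing acc with
  | nil => simp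
  | cons hd tl ih =>
    simp only [List.map, List.foldl_cons, List.any_cons, stepB]
    rw [ih]
    cases h1 : PySem.Str.isIn hd c <;> simp [h1]

-- the canonical value of B's accumulator
def accOf (c t : String) : AccB :=
  { hb := kwBreak.any (fun kw => PySem.Str.isIn kw c),
    hl := kwLunch.any (fun kw => PySem.Str.isIn kw c),
    hs := kwSnack.any (fun kw => PySem.Str.isIn kw c),
    din_c := (kwDin.countP (fun kw => PySem.Str.isIn kw c) : Int),
    din_t := kwDin.any (fun kw => PySem.Str.isIn kw t),
    des_c := (kwDes.countP (fun kw => PySem.Str.isIn kw c) : Int),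
    des_t := kwDes.any (fun kw => PySem.Str.isIn kw t) }

-- the whole flat fold, in terms of per-category counts and anys
theorem fold_flat (c t : String) :
    flatB.foldl (stepB c t) ⟨false, false, false, 0, false, 0, false⟩ = accOf c t := by
  have hflat : flatB =
      (kwBreak.map (fun kw => (kw, "breakfast"))) ++
      (kwLunch.map (fun kw => (kw, "lunch"))) ++
      (kwDin.map (fun kw => (kw, "dinner"))) ++
      (kwDes.map (fun kw => (kw, "dessert"))) ++
      (kwSnack.map (fun kw => (kw, "snack"))) := by rfl
  rw [hflat]
  simp only [List.foldl_append, fold_breakfast, fold_lunch, fold_dinner, fold_dessert, fold_snack]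
  simp [accOf]

-- bridging A's score tests with B's hit flags
theorem countP_ge_one_iff_any {α : Type} (p : α → Bool) (l : List α) :
    ((1:Int) ≤ ((l.countP p : Nat) : Int)) ↔ l.any p = true := by
  rw [List.any_eq_true]
  constructor
  · intro h
    exact List.countP_pos_iff.mp (by omega)
  · intro h
    have := List.countP_pos_iff.mpr h
    omega

theorem countP_pos_iff_any {α : Type} (p : α → Bool) (l : List α) :
    ((0:Int) < ((l.countP p : Nat) : Int)) ↔ l.any p = true := by
  rw [← countP_ge_one_iff_any]
  omega

-- A's nested dessert-heuristic ifs equal B's single conjunction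
theorem fallback_eq (text_lower combined : String) :
    fallbackA text_lower combined =
      (if dessertIngredientsB.any (fun ing => PySem.Str.isIn ing text_lower) ∧
          ¬ (savoryB.any (fun sv => PySem.Str.isIn sv combined)) then some "dessert"
       else none) := by
  unfold fallbackA dessertIngredientsB savoryB
  cases h1 : List.any _ (fun ing => PySem.Str.isIn ing text_lower) <;>
    cases h2 : List.any _ (fun sv => PySem.Str.isIn sv combined) <;> simp_all

-- A's afterTie path equals B's branch chain over the canonical accumulator
theorem afterTie_eq_restB (c t tl : String) :
    afterTieA c t tl (PySem.Dict.mk mealKeywordsA) = restB (accOf c t) tl c := by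
  unfold afterTieA restB accOf
  have hitems : PySem.Dict.items (PySem.Dict.mk mealKeywordsA) =
      [("breakfast", kwBreak), ("lunch", kwLunch), ("dinner", kwDin),
       ("dessert", kwDes), ("snack", kwSnack)] := rfl
  rw [hitems, fallback_eq]
  simp only [mealLoopA, PySem.List.foldl_if_add_one, ite_self, zero_add,
    countP_ge_one_iff_any, countP_pos_iff_any]
  split_ifs <;> rfl

-- the dinner/dessert precedence tree, scores and flags abstracted
theorem tree_eq (c2 c3 : Int) (a2 a3 : Bool) (E : Option String) :
    (if (c2 > 0 ∧ c3 > 0) then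
       if a2 = true ∧ ¬ a3 = true then some "dinner"
       else if a3 = true ∧ ¬ a2 = true then some "dessert"
       else if c2 ≥ c3 then some "dinner"
       else E
     else E)
    = (if (c2 > 0 ∧ c3 > 0) then
        if a2 ≠ a3 then (if a2 = true then some "dinner" else some "dessert")
        else if c2 ≥ c3 then some "dinner" else E
       else E) := by
  cases a2 <;> cases a3 <;> split_ifs <;> first | rfl | omega | simp_all

-- ===== VERDICT (by name: the statement is the Claim_ definition above) =====
set_option maxHeartbeats 1600000 in
theorem extract_meal_type_py_spec : Claim_equal_extract_meal_type_py := by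
  intro text title ingredients _
  unfold Spec_extract_meal_type_py extract_meal_type_py extract_meal_type_py_alt
  have hdin : PySem.Dict.getD (PySem.Dict.mk mealKeywordsA) "dinner" ([]:List String) = kwDin := rfl
  have hdes : PySem.Dict.getD (PySem.Dict.mk mealKeywordsA) "dessert" ([]:List String) = kwDes := rfl
  simp only [hdin, hdes, PySem.List.foldl_if_add_one, fold_flat, afterTie_eq_restB, zero_add]
  dsimp only [accOf]
  exact tree_eq _ _ _ _ _
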